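-- pv_equiv track=rewrite | github.com/swatv3nub/DAP | TUPLE/joinTuples.py | join_tuples
-- ===== SOURCE A (Python) =====
-- def join_tuples(tuples):
--     result = {}
--     for tup in tuples:
--         if tup[0] in result:
--             result[tup[0]] += tup[1:]
--         else:
--             result[tup[0]] = tup
--     return list(result.values())
-- ===== SOURCE B (Python) =====
-- def join_tuples(tuples):
--     tuples = list(tuples)
--     # distinct first elements in first-occurrence order
--     seen = set()
--     keys = []
--     for t in tuples:
--         if t[0] not in seen:
--             seen.add(t[0])
--             keys.append(t[0])
--     out = []
--     for k in keys:
--         matches = [t for t in tuples if t[0] == k]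
--         merged = matches[0]
--         for t in matches[1:]:
--             merged = merged + t[1:]
--         out.append(merged)
--     return out
-- ===== Notes on version B (the rewrite author's own statement) =====
-- stated objective: alternative
-- what changed: Replaces the single dict-accumulation pass with a two-phase algorithm: first collect the distinct first elements in first-occurrence order with a seen-set, then for each key make a separate pass gathering its matching tuples and concatenating their tails.
import Mathlib
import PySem

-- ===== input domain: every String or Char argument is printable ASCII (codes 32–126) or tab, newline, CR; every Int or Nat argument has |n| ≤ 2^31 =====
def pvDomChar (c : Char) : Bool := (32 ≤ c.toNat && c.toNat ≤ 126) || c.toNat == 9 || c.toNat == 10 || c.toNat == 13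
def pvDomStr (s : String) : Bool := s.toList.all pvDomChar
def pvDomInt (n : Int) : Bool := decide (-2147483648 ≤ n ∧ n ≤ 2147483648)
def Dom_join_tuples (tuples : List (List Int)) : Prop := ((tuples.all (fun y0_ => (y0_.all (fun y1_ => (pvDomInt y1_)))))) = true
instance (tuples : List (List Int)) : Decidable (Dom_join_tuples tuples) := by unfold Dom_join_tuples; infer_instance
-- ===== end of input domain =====

-- B re-implements A in two phases (ordered distinct keys, then one merging scan per key) instead of one dict-accumulation pass; objective: alternative.

-- ===== PORT A =====
-- tup[0] is ported as headI; Pre_ guarantees every tuple is nonempty (Python raises IndexError otherwise).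
def join_tuples (tuples : List (List Int)) : List (List Int) :=
  (tuples.foldl
    (fun (result : PySem.Dict Int (List Int)) tup =>
      if result.contains tup.headI then
        result.modify tup.headI [] (fun v => v ++ PySem.List.slice tup (some 1) none)
      else
        result.insert tup.headI tup)
    PySem.Dict.empty).values

-- ===== PORT B =====
-- the seen-set/keys loop of B
def pvAltKeys : List (List Int) → List Int → List Int
  | [], _ => []
  | t :: ts, seen =>
    if seen.contains t.headI then pvAltKeys ts seen
    else t.headI :: pvAltKeys ts (t.headI :: seen)

-- B's per-key scan: matches, then fold the tails onto the first match
def pvMergeKey (tuples : List (List Int)) (k : Int) : List Int :=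
  match tuples.filter (fun t => t.headI == k) with
  | [] => []
  | m :: rest => rest.foldl (fun acc t => acc ++ PySem.List.slice t (some 1) none) m

def join_tuples_alt (tuples : List (List Int)) : List (List Int) :=
  (pvAltKeys tuples []).map (pvMergeKey tuples)

-- ===== PRECONDITION & SPEC =====
-- Pre_ excludes exactly the inputs containing an empty tuple, on which Python A raises IndexError (B raises too).
def Pre_join_tuples (tuples : List (List Int)) : Prop := ∀ t ∈ tuples, t ≠ []
instance (tuples : List (List Int)) : Decidable (Pre_join_tuples tuples) := by unfold Pre_join_tuples; infer_instance
def pvWitness_join_tuples : List (List Int) := [[1, 2], [1, 3, 4], [2, 5], [1, 6]]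
def Spec_join_tuples (tuples : List (List Int)) (out : List (List Int)) : Prop := out = join_tuples_alt tuples
instance (tuples : List (List Int)) (out : List (List Int)) : Decidable (Spec_join_tuples tuples out) := by unfold Spec_join_tuples; infer_instance

-- ===== CLAIM (what is proved, stated in full; the proofs are below) =====
def Claim_equal_join_tuples : Prop := ∀ (tuples : List (List Int)), Dom_join_tuples tuples → Pre_join_tuples tuples → Spec_join_tuples tuples (join_tuples tuples)

-- ===== LEMMAS AND PROOFS =====

-- membership in the seen-filtered distinct-keys list
lemma mem_pvAltKeys (p : List (List Int)) (seen : List Int) (k : Int) :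
    k ∈ pvAltKeys p seen ↔ k ∉ seen ∧ k ∈ p.map (·.headI) := by
  induction p generalizing seen with
  | nil => simp [pvAltKeys]
  | cons t ts ih =>
    by_cases h : t.headI ∈ seen <;>
      simp only [pvAltKeys, h, List.contains_iff_mem, if_true, if_false, List.mem_cons, ih, List.map_cons]
    · constructor
      · rintro ⟨h1, h2⟩; exact ⟨h1, Or.inr h2⟩
      · rintro ⟨h1, hu | h2⟩
        · exact absurd (by rw [hu]; exact h) h1
        · exact ⟨h1, h2⟩
    · constructor
      · rintro (hu | ⟨h1, h2⟩)
        · exact ⟨by rw [hu]; exact h, Or.inl hu⟩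
        · exact ⟨fun hs => h1 (Or.inr hs), Or.inr h2⟩
      · rintro ⟨h1, hu | h2⟩
        · exact Or.inl hu
        · by_cases hk : k = t.headI
          · exact Or.inl hk
          · exact Or.inr ⟨fun hs => hs.elim hk h1, h2⟩

lemma pvAltKeys_append_singleton (p : List (List Int)) (t : List Int) (seen : List Int) :
    pvAltKeys (p ++ [t]) seen =
      pvAltKeys p seen ++
        (if t.headI ∈ seen ∨ t.headI ∈ p.map (·.headI) then [] else [t.headI]) := by
  induction p generalizing seen with
  | nil =>
    by_cases h : t.headI ∈ seen <;> simp [pvAltKeys, h]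
  | cons u us ih =>
    by_cases h : u.headI ∈ seen
    · simp only [List.cons_append, pvAltKeys, List.contains_iff_mem, h, if_true,
        ih, List.map_cons]
      congr 1
      refine if_congr ?_ rfl rfl
      simp only [List.mem_cons]
      constructor
      · rintro (hs | hm)
        · exact Or.inl hs
        · exact Or.inr (Or.inr hm)
      · rintro (hs | hu | hm)
        · exact Or.inl hs
        · exact Or.inl (by rw [hu]; exact h)
        · exact Or.inr hm
    · simp only [List.cons_append, pvAltKeys, List.contains_iff_mem, h, if_false, ih,
        List.map_cons, List.cons_append]
      congr 2
      refine if_congr ?_ rfl rfl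
      simp only [List.mem_cons]
      tauto

lemma nodup_pvAltKeys (p : List (List Int)) (seen : List Int) : (pvAltKeys p seen).Nodup := by
  induction p generalizing seen with
  | nil => simp [pvAltKeys]
  | cons t ts ih =>
    by_cases h : t.headI ∈ seen
    · simpa [pvAltKeys, h] using ih seen
    · simp only [pvAltKeys, List.contains_iff_mem, h, if_false]
      refine List.nodup_cons.mpr ⟨?_, ih _⟩
      intro hmem
      exact ((mem_pvAltKeys ts _ _).mp hmem).1 List.mem_cons_self

-- a key occurs among the heads iff its filter is nonempty
lemma filter_head_ne_nil_iff (p : List (List Int)) (k : Int) :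
    p.filter (fun t => t.headI == k) ≠ [] ↔ k ∈ p.map (·.headI) := by
  rw [Ne, List.filter_eq_nil_iff, List.mem_map]
  push Not
  simp only [beq_iff_eq]

lemma pvMergeKey_append_same (p : List (List Int)) (t : List Int) (k : Int) (hk : t.headI = k) :
    pvMergeKey (p ++ [t]) k =
      (match p.filter (fun t => t.headI == k) with
       | [] => t
       | _ :: _ => pvMergeKey p k ++ PySem.List.slice t (some 1) none) := by
  unfold pvMergeKey
  rw [List.filter_append]
  cases hp : p.filter (fun t => t.headI == k) with
  | nil => simp [hk]
  | cons m rest => simp [hk, List.foldl_append]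

lemma pvMergeKey_append_ne (p : List (List Int)) (t : List Int) (k : Int) (hk : t.headI ≠ k) :
    pvMergeKey (p ++ [t]) k = pvMergeKey p k := by
  unfold pvMergeKey
  rw [List.filter_append]
  simp [hk]

-- the dict accumulated by A over a prefix p is exactly B's keys/merge description of p
lemma pv_items_foldl (p : List (List Int)) :
    (p.foldl
      (fun (result : PySem.Dict Int (List Int)) tup =>
        if result.contains tup.headI then
          result.modify tup.headI [] (fun v => v ++ PySem.List.slice tup (some 1) none)
        else
          result.insert tup.headI tup)
      PySem.Dict.empty).items
      = (pvAltKeys p []).map (fun k => (k, pvMergeKey p k)) := by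
  induction p using List.reverseRecOn with
  | nil => rfl
  | append_singleton p t ih =>
    rw [List.foldl_append, List.foldl_cons, List.foldl_nil]
    set d := p.foldl
      (fun (result : PySem.Dict Int (List Int)) tup =>
        if result.contains tup.headI then
          result.modify tup.headI [] (fun v => v ++ PySem.List.slice tup (some 1) none)
        else
          result.insert tup.headI tup)
      PySem.Dict.empty with hd
    have hkeys : d.keys = pvAltKeys p [] := by
      simp only [PySem.Dict.keys, ih, List.map_map]
      have hcomp : ((fun x : ℤ × List ℤ => x.1) ∘ (fun k : ℤ => (k, pvMergeKey p k))) = id := rfl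
      rw [hcomp, List.map_id]
    have hnodup : d.keys.Nodup := hkeys ▸ nodup_pvAltKeys p []
    have hmod : ∀ (k : Int) (f : List Int → List Int),
        d.modify k [] f = d.insert k (f (d.getD k [])) := fun _ _ => rfl
    by_cases hc : t.headI ∈ pvAltKeys p []
    · have hcont : d.contains t.headI = true := by
        rw [PySem.Dict.contains_eq_decide_mem_keys, hkeys]; exact decide_eq_true hc
      have hheads : t.headI ∈ p.map (·.headI) := ((mem_pvAltKeys p [] _).mp hc).2
      have hmem : (t.headI, pvMergeKey p t.headI) ∈ d.items := by
        rw [ih]; exact List.mem_map_of_mem hc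
      have hgetD : d.getD t.headI [] = pvMergeKey p t.headI :=
        PySem.Dict.getD_of_mem_items d hmem hnodup []
      rw [hmod]
      simp only [hcont, if_true]
      rw [hgetD,
        PySem.Dict.items_insert_of_contains d _ hcont, ih, List.map_map,
        pvAltKeys_append_singleton, if_pos (Or.inr hheads), List.append_nil]
      refine List.map_congr_left ?_
      intro k hk
      by_cases hkh : k = t.headI
      · simp only [Function.comp]
        have hf : p.filter (fun u => u.headI == k) ≠ [] :=
          (filter_head_ne_nil_iff p k).mpr (hkh.symm ▸ hheads)
        rw [if_pos (by simp [hkh]), pvMergeKey_append_same p t k hkh.symm]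
        cases hfe : p.filter (fun u => u.headI == k) with
        | nil => exact absurd hfe hf
        | cons m rest => rw [hkh]
      · simp only [Function.comp]
        rw [if_neg (by simpa using Ne.symm (fun h => hkh h.symm)),
          pvMergeKey_append_ne p t k (fun h => hkh h.symm)]
    · have hcont : d.contains t.headI = false := by
        rw [PySem.Dict.contains_eq_decide_mem_keys, hkeys]; exact decide_eq_false hc
      have hheads : t.headI ∉ p.map (·.headI) := fun hm =>
        hc ((mem_pvAltKeys p [] _).mpr ⟨by simp, hm⟩)
      simp only [hcont, Bool.false_eq_true, if_false]
      rw [PySem.Dict.items_insert_of_not_contains d _ hcont, ih,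
        pvAltKeys_append_singleton, if_neg (by simpa using hheads), List.map_append]
      congr 1
      · refine List.map_congr_left ?_
        intro k hk
        have hkh : t.headI ≠ k := fun h =>
          hheads (h ▸ ((mem_pvAltKeys p [] _).mp hk).2)
        rw [pvMergeKey_append_ne p t k hkh]
      · simp only [List.map_cons, List.map_nil]
        rw [pvMergeKey_append_same p t _ rfl]
        have hf : p.filter (fun u => u.headI == t.headI) = [] := by
          by_contra h
          exact hheads ((filter_head_ne_nil_iff p _).mp h)
        rw [hf]

-- ===== VERDICT (by name: the statement is the Claim_ definition above) =====
theorem join_tuples_spec : Claim_equal_join_tuples := by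
  intro tuples _ _
  unfold Spec_join_tuples join_tuples join_tuples_alt
  rw [PySem.Dict.values, pv_items_foldl]
  simp [List.map_map, Function.comp]
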